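-- pv_equiv track=rewrite | github.com/MarcoFloresCa/AsigCorreos | src/main.py | group_by_thread
-- ===== SOURCE A (Python) =====
-- def group_by_thread(emails):
--     threads = {}
--     for email in emails:
--         thread_id = email.get('thread_id', '')
--         if thread_id not in threads:
--             threads[thread_id] = []
--         threads[thread_id].append(email)
--
--     result = []
--     for thread_id, thread_emails in threads.items():
--         thread_emails.sort(key=lambda x: int(x.get('date', 0)), reverse=True)
--         result.append(thread_emails[0])
--
--     return result
-- ===== SOURCE B (Python) =====
-- def group_by_thread(emails):
--     best = {}
--     for email in emails:
--         tid = email.get('thread_id', '')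
--         d = int(email.get('date', 0))
--         cur = best.get(tid)
--         best[tid] = (d, email) if cur is None or d > cur[0] else cur
--     return [email for _, email in best.values()]
-- ===== Notes on version B (the rewrite author's own statement) =====
-- stated objective: alternative
-- what changed: Instead of grouping all emails per thread_id and stable-reverse-sorting each group to take its head, B makes a single pass keeping per thread_id only the running best (strictly later date wins, so the earliest email wins date ties, matching A's stable sort).
import Mathlib
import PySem

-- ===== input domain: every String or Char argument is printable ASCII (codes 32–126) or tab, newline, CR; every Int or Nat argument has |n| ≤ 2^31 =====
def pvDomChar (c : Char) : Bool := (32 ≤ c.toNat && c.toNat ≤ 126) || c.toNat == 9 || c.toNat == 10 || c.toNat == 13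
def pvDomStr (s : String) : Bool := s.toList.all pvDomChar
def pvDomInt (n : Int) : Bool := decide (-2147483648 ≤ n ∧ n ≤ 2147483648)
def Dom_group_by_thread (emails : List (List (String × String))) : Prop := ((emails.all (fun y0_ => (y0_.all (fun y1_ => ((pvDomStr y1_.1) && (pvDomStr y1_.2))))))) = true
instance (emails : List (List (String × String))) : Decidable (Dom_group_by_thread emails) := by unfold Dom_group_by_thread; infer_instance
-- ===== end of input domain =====

-- B replaces A's group-everything-then-stable-sort-each-group pass by a single pass that keeps,
-- per thread_id, only the running best (latest-dated, earliest on ties) email.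
-- Neither version mutates the input list; A sorts only freshly built group lists.

-- shared helpers (the field reads both Pythons perform): email.get('thread_id', '')
def pvTid (e : List (String × String)) : String :=
  (PySem.Dict.mk e).getD "thread_id" ""

-- int(email.get('date', 0)): none exactly where Python's int() raises ValueError
def pvDate? (e : List (String × String)) : Option Int :=
  match (PySem.Dict.mk e).get? "date" with
  | none => some 0
  | some s => PySem.Int.ofStr? s

def pvDate (e : List (String × String)) : Int := (pvDate? e).getD 0

-- ===== PORT A =====
-- thread_emails[0] on the sorted group: the group is never empty, so the pyGet? below is never none
def group_by_thread (emails : List (List (String × String))) : List (List (String × String)) :=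
  let threads := emails.foldl (fun d email =>
      let tid := pvTid email
      let d' := if d.contains tid then d else d.insert tid ([] : List (List (String × String)))
      d'.modify tid [] (fun l => l ++ [email]))
    PySem.Dict.empty
  threads.items.foldl (fun r p =>
      r ++ [(PySem.List.pyGet? (PySem.List.sorted p.2 pvDate true) 0).getD []]) []

-- ===== PORT B =====
def group_by_thread_alt (emails : List (List (String × String))) : List (List (String × String)) :=
  let best := emails.foldl (fun d email =>
      let tid := pvTid email
      let dk := pvDate email
      let cur := d.get? tid
      d.insert tid (match cur with
        | none => (dk, email)
        | some c => if dk > c.1 then (dk, email) else c))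
    PySem.Dict.empty
  best.values.map (fun p => p.2)

-- ===== PRECONDITION & SPEC =====
-- Pre_ excludes exactly the inputs where Python's int(email.get('date', 0)) raises ValueError
def Pre_group_by_thread (emails : List (List (String × String))) : Prop :=
  ∀ e ∈ emails, (pvDate? e).isSome = true
instance (emails : List (List (String × String))) : Decidable (Pre_group_by_thread emails) := by
  unfold Pre_group_by_thread; infer_instance

def pvWitness_group_by_thread : (List (List (String × String))) :=
  [[("thread_id", "a"), ("date", "3")], [("thread_id", "a"), ("date", "5")], [("date", "1")]]

def Spec_group_by_thread (emails : List (List (String × String))) (out : List (List (String × String))) : Prop := out = group_by_thread_alt emails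
instance (emails : List (List (String × String))) (out : List (List (String × String))) : Decidable (Spec_group_by_thread emails out) := by unfold Spec_group_by_thread; infer_instance

-- ===== CLAIM (what is proved, stated in full; the proofs are below) =====
def Claim_equal_group_by_thread : Prop := ∀ (emails : List (List (String × String))), Dom_group_by_thread emails → Pre_group_by_thread emails → Spec_group_by_thread emails (group_by_thread emails)

-- ===== LEMMAS AND PROOFS =====

-- the running-best step over a group (what B's dict keeps per key, value part only)
def pvBestStep (h : Option (List (String × String))) (e : List (String × String)) :
    Option (List (String × String)) :=
  match h with
  | none => some e
  | some y => if pvDate y < pvDate e then some e else some y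

-- B's per-key step on (date, email) pairs
def pvStep (acc : Option (Int × List (String × String))) (e : List (String × String)) :
    Option (Int × List (String × String)) :=
  match acc with
  | none => some (pvDate e, e)
  | some c => some (if pvDate e > c.1 then (pvDate e, e) else c)

lemma pvStepA_eq (d : PySem.Dict String (List (List (String × String))))
    (e : List (String × String)) :
    (if d.contains (pvTid e) then d else d.insert (pvTid e) []).modify (pvTid e) []
        (fun l => l ++ [e])
      = d.modify (pvTid e) [] (fun l => l ++ [e]) := by
  by_cases h : d.contains (pvTid e)
  · simp [h]
  · have hf : d.contains (pvTid e) = false := by simpa using h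
    rw [if_neg (by simp [hf])]
    simp only [PySem.Dict.modify, PySem.Dict.getD_insert_self,
      PySem.Dict.insert_insert_self, PySem.Dict.getD_of_not_contains _ _ hf]

lemma pvThreadsA_getD (emails : List (List (String × String))) (t : String) :
    ((emails.foldl (fun d e => d.modify (pvTid e) [] (fun l => l ++ [e]))
        PySem.Dict.empty).getD t [])
      = emails.filter (fun e => pvTid e == t) := by
  have h := PySem.Dict.getD_foldl_modify_append
      (emails.map (fun e => (pvTid e, e))) PySem.Dict.empty t
  rw [List.foldl_map] at h
  simpa [List.filter_map, Function.comp_def] using h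

lemma pvGetB (l : List (List (String × String))) :
    ∀ (d : PySem.Dict String (Int × List (String × String))) (t : String),
    (l.foldl (fun d email =>
        d.insert (pvTid email) (match d.get? (pvTid email) with
          | none => (pvDate email, email)
          | some c => if pvDate email > c.1 then (pvDate email, email) else c)) d).get? t
      = (l.filter (fun e => pvTid e == t)).foldl pvStep (d.get? t) := by
  induction l with
  | nil => intro d t; rfl
  | cons e l ih =>
    intro d t
    rw [List.foldl_cons, ih]
    by_cases h : pvTid e = t
    · subst h
      simp only [List.filter_cons, beq_self_eq_true, if_true, List.foldl_cons,
        PySem.Dict.get?_insert_self]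
      congr 1
      cases hc : d.get? (pvTid e) <;> simp [pvStep]
    · have hne : t ≠ pvTid e := fun hh => h hh.symm
      rw [PySem.Dict.get?_insert_of_ne _ _ hne]
      simp [h]

lemma pvHead?_foldl_insertBy (g : List (List (String × String))) :
    ∀ acc : List (List (String × String)),
    (g.foldl (fun acc x =>
        PySem.List.insertBy (fun a b => decide (pvDate b < pvDate a)) x acc) acc).head?
      = g.foldl pvBestStep acc.head? := by
  induction g with
  | nil => intro acc; rfl
  | cons e g ih =>
    intro acc
    rw [List.foldl_cons, ih, List.foldl_cons]
    congr 1
    cases acc with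
    | nil => rfl
    | cons y t =>
      simp only [PySem.List.insertBy, pvBestStep, List.head?_cons]
      split_ifs with h1 h2 h3 <;> simp_all

lemma pvHead?_sorted_rev (g : List (List (String × String))) :
    (PySem.List.sorted g pvDate true).head? = g.foldl pvBestStep none := by
  rw [PySem.List.sorted_rev_eq_foldl_insertBy]
  exact pvHead?_foldl_insertBy g []

lemma pvFoldl_pvStep_map (g : List (List (String × String))) :
    ∀ h : Option (List (String × String)),
    g.foldl pvStep (h.map (fun e => (pvDate e, e)))
      = (g.foldl pvBestStep h).map (fun e => (pvDate e, e)) := by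
  induction g with
  | nil => intro h; rfl
  | cons e g ih =>
    intro h
    rw [List.foldl_cons, List.foldl_cons, ← ih]
    congr 1
    cases h with
    | none => rfl
    | some y =>
      simp only [Option.map_some, pvStep, pvBestStep, GT.gt]
      split_ifs <;> simp

lemma pvBest_isSome (g : List (List (String × String))) :
    ∀ y : List (String × String), (g.foldl pvBestStep (some y)).isSome = true := by
  induction g with
  | nil => intro y; rfl
  | cons e g ih =>
    intro y
    rw [List.foldl_cons]
    simp only [pvBestStep]
    split_ifs <;> exact ih _

lemma pvPyGet?_zero (g : List (List (String × String))) :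
    PySem.List.pyGet? g 0 = g.head? := by
  cases g <;> simp [PySem.List.pyGet?, PySem.List.pyIdx?]

-- ===== VERDICT (by name: the statement is the Claim_ definition above) =====
theorem group_by_thread_spec : Claim_equal_group_by_thread := by
  unfold Claim_equal_group_by_thread
  intro emails _dom _pre
  unfold Spec_group_by_thread group_by_thread group_by_thread_alt
  simp only []
  -- A's grouping loop is the plain modify-append loop
  have hstep : (fun (d : PySem.Dict String (List (List (String × String)))) email =>
      (if d.contains (pvTid email) then d
        else d.insert (pvTid email) ([] : List (List (String × String)))).modify (pvTid email) []
        (fun l => l ++ [email]))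
      = fun d e => d.modify (pvTid e) [] (fun l => l ++ [e]) := by
    funext d e; exact pvStepA_eq d e
  rw [hstep]
  -- key lists of the two dicts
  have hkA := PySem.Dict.keys_foldl_modify_key emails pvTid
      ([] : List (List (String × String))) (fun _ e => fun l => l ++ [e]) PySem.Dict.empty
  have hkB := PySem.Dict.keys_foldl_insert_key emails pvTid
      (fun d email => match d.get? (pvTid email) with
        | none => (pvDate email, email)
        | some c => if pvDate email > c.1 then (pvDate email, email) else c) PySem.Dict.empty
  simp only [PySem.Dict.keys_empty, PySem.Set.update_nil_left] at hkA hkB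
  have hndA := PySem.Dict.nodup_keys_foldl_modify_key emails pvTid
      ([] : List (List (String × String))) (fun _ e => fun l => l ++ [e]) PySem.Dict.empty
      PySem.Dict.nodup_keys_empty
  have hndB := PySem.Dict.nodup_keys_foldl_insert_key emails pvTid
      (fun d email => match d.get? (pvTid email) with
        | none => (pvDate email, email)
        | some c => if pvDate email > c.1 then (pvDate email, email) else c) PySem.Dict.empty
      PySem.Dict.nodup_keys_empty
  have hndA2 : (List.foldl (fun d e => d.modify (pvTid e) [] fun l => l ++ [e])
      PySem.Dict.empty emails).keys.Nodup := hndA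
  have hndB2 : (List.foldl (fun d email =>
      PySem.Dict.insert d (pvTid email) (match d.get? (pvTid email) with
        | none => (pvDate email, email)
        | some c => if pvDate email > c.1 then (pvDate email, email) else c))
      PySem.Dict.empty emails).keys.Nodup := hndB
  have hfold := PySem.List.foldl_append_singleton_eq_map
      (fun (p : String × List (List (String × String))) =>
        (PySem.List.pyGet? (PySem.List.sorted p.2 pvDate true) 0).getD [])
      ((emails.foldl (fun d e => d.modify (pvTid e) [] (fun l => l ++ [e]))
        PySem.Dict.empty).items) []
  rw [hfold]
  rw [PySem.Dict.items_eq_map_keys _ hndA2 ([] : List (List (String × String)))]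
  rw [PySem.Dict.values_eq_map_keys _ hndB2 ((0 : Int), ([] : List (String × String)))]
  rw [hkA, hkB]
  simp only [List.nil_append, List.map_map, Function.comp_def]
  apply List.map_congr_left
  intro t ht
  dsimp only
  have htm : t ∈ emails.map pvTid := (PySem.Set.mem_ofList _ _).mp ht
  -- the group of t is nonempty
  obtain ⟨e, he, hte⟩ := List.mem_map.mp htm
  have hef : e ∈ emails.filter (fun e => pvTid e == t) := by
    rw [List.mem_filter]; exact ⟨he, by simp [hte]⟩
  rw [pvThreadsA_getD, PySem.Dict.getD_eq_get?_getD, pvGetB, PySem.Dict.get?_empty]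
  have hmap := pvFoldl_pvStep_map (emails.filter (fun e => pvTid e == t)) none
  simp only [Option.map_none] at hmap
  rw [hmap, pvPyGet?_zero, pvHead?_sorted_rev]
  -- the best over the nonempty group is some
  have hnil : emails.filter (fun e => pvTid e == t) ≠ [] := by
    intro hnil; rw [hnil] at hef; cases hef
  obtain ⟨e0, g0, hg⟩ := List.exists_cons_of_ne_nil hnil
  rw [hg]
  have hs : ((e0 :: g0).foldl pvBestStep none).isSome = true := by
    rw [List.foldl_cons]; exact pvBest_isSome g0 e0
  obtain ⟨be, hbe⟩ := Option.isSome_iff_exists.mp hs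
  rw [hbe]
  rfl
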